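-- pv_equiv track=rewrite | github.com/mnot/rfc-http-validate | rfc_http_validate/validate.py | combine_8792
-- ===== SOURCE A (Python) =====
-- def combine_8792(lines):
--     if not "NOTE: '\\' line wrapping per RFC 8792" in lines[0]:
--         return lines
--     else:
--         lines = lines[2:]
--     output = []
--     continuation = False
--     for line in lines:
--         prev_continuation = continuation
--         if line.endswith("\\"):
--             continuation = True
--             line = line[:-1]
--         else:
--             continuation = False
--         if prev_continuation:
--             output[-1] += line.lstrip()
--         else:
--             output.append(line)
--     return output
-- ===== SOURCE B (Python) =====
-- def combine_8792(lines):
--     if "NOTE: '\\' line wrapping per RFC 8792" not in lines[0]: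
--         return lines
--     output = []
--     for line in reversed(lines[2:]):
--         if line.endswith("\\"):
--             merged = line[:-1] + (output[0].lstrip() if output else "")
--             output = [merged] + output[1:]
--         else:
--             output = [line] + output
--     return output
-- ===== Notes on version B (the rewrite author's own statement) =====
-- stated objective: alternative
-- what changed: Replaces A's left-to-right loop carrying a continuation flag and mutating output[-1] with a right-to-left fold over reversed(lines[2:]) that merges a backslash-continued line into the head of the already-built suffix (correct because lstrip is idempotent on the merged head).
import Mathlib
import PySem

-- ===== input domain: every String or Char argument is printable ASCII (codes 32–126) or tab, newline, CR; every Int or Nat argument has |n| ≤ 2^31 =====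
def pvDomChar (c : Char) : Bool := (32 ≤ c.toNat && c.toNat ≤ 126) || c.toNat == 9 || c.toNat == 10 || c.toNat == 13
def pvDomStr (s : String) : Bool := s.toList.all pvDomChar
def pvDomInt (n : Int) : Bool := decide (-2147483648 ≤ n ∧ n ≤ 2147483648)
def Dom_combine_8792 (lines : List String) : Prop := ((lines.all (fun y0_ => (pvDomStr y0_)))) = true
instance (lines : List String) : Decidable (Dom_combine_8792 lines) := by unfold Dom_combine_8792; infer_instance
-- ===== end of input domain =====

-- B unwraps the continuations by a right-to-left fold (reversed iteration, merging into
-- the head of the already-built suffix) instead of A's left-to-right flag-carrying loop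
-- that mutates output[-1]; return value only.


-- ===== PORT A =====
-- one loop iteration of A: state = (output, continuation)
def combineStepA (st : List String × Bool) (line : String) : List String × Bool :=
  let prev_continuation := st.2
  let continuation := PySem.Str.endswith line "\\"
  let line' := if continuation then PySem.Str.slice line none (some (-1)) else line
  if prev_continuation then
    (st.1.dropLast ++ [st.1.getLastD "" ++ PySem.Str.lstrip line'], continuation)
  else
    (st.1 ++ [line'], continuation)

def combine_8792 (lines : List String) : List String :=
  match lines with
  | [] => []   -- Python raises IndexError on lines[0]; excluded by Pre_
  | line0 :: _ =>
    if ¬ (PySem.Str.isIn "NOTE: '\\' line wrapping per RFC 8792" line0) then lines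
    else ((PySem.List.slice lines (some 2) none).foldl combineStepA ([], false)).1

-- ===== PORT B =====
-- one iteration of B's reversed loop: merge `line` into the head of the suffix result
def combineStepB (line : String) (output : List String) : List String :=
  if PySem.Str.endswith line "\\" then
    (PySem.Str.slice line none (some (-1)) ++
      (match output with | [] => "" | h :: _ => PySem.Str.lstrip h)) ::
      PySem.List.slice output (some 1) none
  else line :: output

def combine_8792_alt (lines : List String) : List String :=
  match lines with
  | [] => []   -- lines[0] raises; excluded by Pre_
  | line0 :: _ =>
    if ¬ (PySem.Str.isIn "NOTE: '\\' line wrapping per RFC 8792" line0) then lines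
    else (PySem.List.slice lines (some 2) none).foldr combineStepB []

-- ===== PRECONDITION & SPEC =====
-- A evaluates lines[0], which raises IndexError on the empty list; Pre_ excludes exactly that.
def Pre_combine_8792 (lines : List String) : Prop := lines ≠ []
instance (lines : List String) : Decidable (Pre_combine_8792 lines) := by unfold Pre_combine_8792; infer_instance
def pvWitness_combine_8792 : List String := ["hello"]

def Spec_combine_8792 (lines : List String) (out : List String) : Prop := out = combine_8792_alt lines
instance (lines : List String) (out : List String) : Decidable (Spec_combine_8792 lines out) := by unfold Spec_combine_8792; infer_instance

-- ===== CLAIM (what is proved, stated in full; the proofs are below) =====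
def Claim_equal_combine_8792 : Prop := ∀ (lines : List String), Dom_combine_8792 lines → Pre_combine_8792 lines → Spec_combine_8792 lines (combine_8792 lines)

-- ===== LEMMAS AND PROOFS =====

-- lstrip distributes over appending an already-lstripped string
theorem dropWhile_idem {α} (p : α → Bool) (l : List α) :
    List.dropWhile p (List.dropWhile p l) = List.dropWhile p l := by
  induction l with
  | nil => rfl
  | cons x xs ih =>
    by_cases h : p x
    · simpa [h] using ih
    · simp [h]

theorem lstrip_append_lstrip (a b : String) :
    PySem.Str.lstrip (a ++ PySem.Str.lstrip b) = PySem.Str.lstrip a ++ PySem.Str.lstrip b := by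
  apply String.toList_inj.mp
  simp [PySem.Str.toList_lstrip, PySem.Chars.lstrip, List.dropWhile_append, dropWhile_idem]

-- the simulation: A's foldl from (out, false) produces out ++ B's foldr; from a pending
-- continuation (out ++ [buf], true) it merges buf with the head of B's foldr.
theorem combineAB (n : Nat) :
    (∀ (body : List String) (out : List String), body.length ≤ n →
      (body.foldl combineStepA (out, false)).1 = out ++ body.foldr combineStepB []) ∧
    (∀ (body : List String) (buf : String) (out : List String), body.length ≤ n →
      (body.foldl combineStepA (out ++ [buf], true)).1 =
        out ++ (match body.foldr combineStepB [] with
                | [] => [buf]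
                | h :: t => (buf ++ PySem.Str.lstrip h) :: t)) := by
  induction n with
  | zero =>
    constructor
    · intro body out hlen
      match body, hlen with
      | [], _ => simp [List.foldl]
    · intro body buf out hlen
      match body, hlen with
      | [], _ => simp [List.foldl]
  | succ n ih =>
    obtain ⟨ih1, ih2⟩ := ih
    constructor
    · intro body out hlen
      match body with
      | [] => simp [List.foldl]
      | l :: ls =>
        have hlen' : ls.length ≤ n := by simpa using hlen
        cases hend : PySem.Chars.endswith l.toList ['\\'] with
        | false =>
          have step : combineStepA (out, false) l = (out ++ [l], false) := by
            simp [combineStepA]; simp [hend]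
          rw [List.foldl_cons, step, ih1 ls _ hlen']
          simp [List.foldr_cons, combineStepB, hend]
        | true =>
          have step : combineStepA (out, false) l =
              (out ++ [PySem.Str.slice l none (some (-1))], true) := by
            simp [combineStepA, hend]
          rw [List.foldl_cons, step, ih2 ls _ out hlen']
          cases hr : ls.foldr combineStepB [] with
          | nil => simp [List.foldr_cons, combineStepB, hend, hr, PySem.List.slice_from_one]
          | cons h t => simp [List.foldr_cons, combineStepB, hend, hr, PySem.List.slice_from_one]
    · intro body buf out hlen
      match body with
      | [] => simp [List.foldl]
      | l :: ls =>
        have hlen' : ls.length ≤ n := by simpa using hlen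
        cases hend : PySem.Chars.endswith l.toList ['\\'] with
        | false =>
          have step : combineStepA (out ++ [buf], true) l =
              (out ++ [buf ++ PySem.Str.lstrip l], false) := by
            simp [combineStepA, hend]
          rw [List.foldl_cons, step, ih1 ls _ hlen']
          simp [List.foldr_cons, combineStepB, hend]
        | true =>
          have step : combineStepA (out ++ [buf], true) l =
              (out ++ [buf ++ PySem.Str.lstrip (PySem.Str.slice l none (some (-1)))], true) := by
            simp [combineStepA, hend]
          rw [List.foldl_cons, step, ih2 ls _ out hlen']
          cases hr : ls.foldr combineStepB [] with
          | nil => simp [List.foldr_cons, combineStepB, hend, hr, PySem.List.slice_from_one]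
          | cons h t =>
            simp [List.foldr_cons, combineStepB, hend, hr, lstrip_append_lstrip, PySem.List.slice_from_one,
              String.append_assoc]

-- ===== VERDICT (by name: the statement is the Claim_ definition above) =====
theorem combine_8792_spec : Claim_equal_combine_8792 := by
  intro lines _ hpre
  unfold Spec_combine_8792
  match lines with
  | [] => exact absurd rfl hpre
  | line0 :: rest =>
    cases hhdr : PySem.Str.isIn "NOTE: '\\' line wrapping per RFC 8792" line0 with
    | false => simp at hhdr; simp [combine_8792, combine_8792_alt, hhdr]
    | true =>
      simp only [combine_8792, combine_8792_alt, hhdr]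
      have h := (combineAB (PySem.List.slice (line0 :: rest) (some 2) none).length).1
        (PySem.List.slice (line0 :: rest) (some 2) none) [] le_rfl
      simpa using h
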